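-- pv_equiv track=rewrite | github.com/AdaCanoglu5/Two-Player-Hashi-Puzzle-Game-Against-AI-With-Alpha-Beta-Pruning | main.py | get_map_dimensions
-- ===== SOURCE A (Python) =====
-- def get_map_dimensions(islands):
--     # to use for setting the size of the map
--     max_x = max(island[0] for island in islands)
--     min_x = min(island[0] for island in islands)
--     max_y = max(island[1] for island in islands)
--     min_y = min(island[1] for island in islands)
--
--     width = max_x - min_x + 1
--     height = max_y - min_y + 1
--
--     return width, height
-- ===== SOURCE B (Python) =====
-- def get_map_dimensions(islands):
--     # single pass maintaining four running extrema
--     max_x = min_x = islands[0][0]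
--     max_y = min_y = islands[0][1]
--     for x, y in islands[1:]:
--         if x > max_x: max_x = x
--         if x < min_x: min_x = x
--         if y > max_y: max_y = y
--         if y < min_y: min_y = y
--     return max_x - min_x + 1, max_y - min_y + 1
-- ===== Notes on version B (the rewrite author's own statement) =====
-- stated objective: alternative
-- what changed: Replaces four separate max/min generator passes over islands with a single loop that maintains four running extrema seeded from the first island; Pre_ excludes the empty list, on which A raises ValueError (and B raises IndexError).
import Mathlib
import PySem

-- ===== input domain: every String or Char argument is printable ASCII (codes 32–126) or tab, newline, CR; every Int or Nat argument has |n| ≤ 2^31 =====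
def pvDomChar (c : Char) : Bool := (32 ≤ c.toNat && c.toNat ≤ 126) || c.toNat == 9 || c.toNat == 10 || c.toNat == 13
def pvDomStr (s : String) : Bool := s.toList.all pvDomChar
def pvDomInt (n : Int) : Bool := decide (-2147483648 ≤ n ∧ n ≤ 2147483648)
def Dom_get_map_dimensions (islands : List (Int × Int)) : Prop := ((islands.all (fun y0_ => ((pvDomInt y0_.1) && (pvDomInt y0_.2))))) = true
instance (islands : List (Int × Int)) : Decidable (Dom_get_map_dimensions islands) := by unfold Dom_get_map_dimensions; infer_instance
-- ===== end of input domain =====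

-- B replaces A's four separate max/min passes with one loop keeping four running extrema; same cost, one pass.


-- ===== PORT A =====
-- A: four independent passes, max/min over a generator (ValueError on [] is excluded by Pre_)
def get_map_dimensions (islands : List (Int × Int)) : Int × Int :=
  match islands with
  | [] => (0, 0)  -- unreachable under Pre_: Python raises ValueError here
  | i :: rest =>
    let max_x := rest.foldl (fun a j => max a j.1) i.1
    let min_x := rest.foldl (fun a j => min a j.1) i.1
    let max_y := rest.foldl (fun a j => max a j.2) i.2
    let min_y := rest.foldl (fun a j => min a j.2) i.2
    let width := max_x - min_x + 1
    let height := max_y - min_y + 1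
    (width, height)

-- ===== PORT B =====
-- B: one pass over islands[1:] with a quadruple of running extrema seeded from islands[0]
def get_map_dimensions_alt (islands : List (Int × Int)) : Int × Int :=
  match islands with
  | [] => (0, 0)  -- unreachable under Pre_: Python raises IndexError here
  | (x0, y0) :: rest =>
    let s := rest.foldl
      (fun (s : Int × Int × Int × Int) p =>
        (if p.1 > s.1 then p.1 else s.1,
         if p.1 < s.2.1 then p.1 else s.2.1,
         if p.2 > s.2.2.1 then p.2 else s.2.2.1,
         if p.2 < s.2.2.2 then p.2 else s.2.2.2))
      (x0, x0, y0, y0)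
    (s.1 - s.2.1 + 1, s.2.2.1 - s.2.2.2 + 1)

-- ===== PRECONDITION & SPEC =====
-- Pre_ excludes only the empty list, on which A raises ValueError (max of empty sequence).
def Pre_get_map_dimensions (islands : List (Int × Int)) : Prop := islands ≠ []
instance (islands : List (Int × Int)) : Decidable (Pre_get_map_dimensions islands) := by unfold Pre_get_map_dimensions; infer_instance
def pvWitness_get_map_dimensions : (List (Int × Int)) := [(0, 2), (3, -1)]

def Spec_get_map_dimensions (islands : List (Int × Int)) (out : Int × Int) : Prop := out = get_map_dimensions_alt islands
instance (islands : List (Int × Int)) (out : Int × Int) : Decidable (Spec_get_map_dimensions islands out) := by unfold Spec_get_map_dimensions; infer_instance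

-- ===== CLAIM (what is proved, stated in full; the proofs are below) =====
def Claim_equal_get_map_dimensions : Prop := ∀ (islands : List (Int × Int)), Dom_get_map_dimensions islands → Pre_get_map_dimensions islands → Spec_get_map_dimensions islands (get_map_dimensions islands)

-- ===== LEMMAS AND PROOFS =====
theorem quad_fold_eq (rest : List (Int × Int)) (a b c d : Int) :
    rest.foldl
      (fun (s : Int × Int × Int × Int) p =>
        (if p.1 > s.1 then p.1 else s.1,
         if p.1 < s.2.1 then p.1 else s.2.1,
         if p.2 > s.2.2.1 then p.2 else s.2.2.1,
         if p.2 < s.2.2.2 then p.2 else s.2.2.2))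
      (a, b, c, d)
    = (rest.foldl (fun a j => max a j.1) a,
       rest.foldl (fun a j => min a j.1) b,
       rest.foldl (fun a j => max a j.2) c,
       rest.foldl (fun a j => min a j.2) d) := by
  induction rest generalizing a b c d with
  | nil => rfl
  | cons p t ih =>
    simp only [List.foldl_cons]
    have h1 : (if p.1 > a then p.1 else a) = max a p.1 := by rw [max_def]; split_ifs <;> omega
    have h2 : (if p.1 < b then p.1 else b) = min b p.1 := by rw [min_def]; split_ifs <;> omega
    have h3 : (if p.2 > c then p.2 else c) = max c p.2 := by rw [max_def]; split_ifs <;> omega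
    have h4 : (if p.2 < d then p.2 else d) = min d p.2 := by rw [min_def]; split_ifs <;> omega
    rw [h1, h2, h3, h4, ih]

-- ===== VERDICT (by name: the statement is the Claim_ definition above) =====
theorem get_map_dimensions_spec : Claim_equal_get_map_dimensions := by
  intro islands _ hpre
  unfold Spec_get_map_dimensions get_map_dimensions get_map_dimensions_alt
  match islands with
  | [] => exact absurd rfl hpre
  | (x0, y0) :: rest =>
    simp only [quad_fold_eq]
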